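-- pv_equiv track=rewrite | github.com/superkaiba/explore-persona-space | scripts/launch_stage.py | _resolve_dataclass_fields
-- ===== SOURCE A (Python) =====
-- def _resolve_dataclass_fields(root_class: str, classmap: dict) -> set[str]:
--     """Walk class bases and collect the UNION of fields across all definitions.
--
--     Union-over-definitions handles the case where the same classname (e.g.
--     `DatasetConfig`) is defined in multiple modules — we want the superset.
--     """
--     seen: set[str] = set()
--     fields: set[str] = set()
--
--     def walk(cls: str) -> None:
--         if cls in seen:
--             return
--         seen.add(cls)
--         for own_fields, bases in classmap.get(cls, []):
--             fields.update(own_fields)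
--             for base in bases:
--                 walk(base)
--
--     walk(root_class)
--     return fields
-- ===== SOURCE B (Python) =====
-- def _resolve_dataclass_fields(root_class: str, classmap: dict) -> set[str]:
--     """Iterative DFS: an explicit stack of work items replaces the recursion.
--
--     A work item is either ('visit', classname) or ('fields', field_list);
--     pushing the items of a class's definitions in reverse keeps the exact
--     depth-first visiting order of the recursive original.
--     """
--     seen: set[str] = set()
--     fields: set[str] = set()
--     stack = [("visit", root_class)]
--     while stack:
--         tag, payload = stack.pop()
--         if tag == "fields":
--             fields.update(payload)
--             continue
--         cls = payload
--         if cls in seen: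
--             continue
--         seen.add(cls)
--         tasks = []
--         for own_fields, bases in classmap.get(cls, []):
--             tasks.append(("fields", own_fields))
--             for base in bases:
--                 tasks.append(("visit", base))
--         stack.extend(reversed(tasks))
--     return fields
-- ===== Notes on version B (the rewrite author's own statement) =====
-- stated objective: alternative
-- what changed: The recursive walk over class bases is replaced by an iterative depth-first search driven by an explicit stack of defunctionalised work items ('visit class' / 'add fields'), pushed in reverse so the traversal and field-insertion order are identical.
import Mathlib
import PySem

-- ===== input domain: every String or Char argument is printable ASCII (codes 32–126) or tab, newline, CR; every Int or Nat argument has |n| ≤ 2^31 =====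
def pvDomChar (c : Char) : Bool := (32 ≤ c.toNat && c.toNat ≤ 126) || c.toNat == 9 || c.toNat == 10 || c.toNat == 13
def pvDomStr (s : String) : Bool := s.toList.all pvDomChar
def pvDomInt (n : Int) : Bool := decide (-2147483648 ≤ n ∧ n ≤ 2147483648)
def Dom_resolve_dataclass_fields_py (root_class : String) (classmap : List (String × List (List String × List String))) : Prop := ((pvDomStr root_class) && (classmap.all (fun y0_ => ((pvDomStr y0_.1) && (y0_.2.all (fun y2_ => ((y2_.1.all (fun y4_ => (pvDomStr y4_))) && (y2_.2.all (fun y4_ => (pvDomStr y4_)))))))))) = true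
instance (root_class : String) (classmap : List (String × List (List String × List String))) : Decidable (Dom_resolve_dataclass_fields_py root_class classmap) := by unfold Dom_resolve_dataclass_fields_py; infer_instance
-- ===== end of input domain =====

-- B replaces A's recursive `walk` by an iterative depth-first search over an explicit
-- stack of defunctionalised work items (same result, same insertion order; objective:
-- alternative decomposition, no speed claim).

-- ===== PORT A =====
-- Recursive `walk` threading the mutable (seen, fields) pair as state.  The fuel
-- bounds the call depth: every recursive call is made from a frame whose class is an
-- unseen key of classmap, so the depth never exceeds classmap.length + 1 and the
-- fuel-0 branch is never reached from the initial call.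
def pvWalkA (classmap : List (String × List (List String × List String))) :
    Nat → String → PySem.Set String → PySem.Set String →
    PySem.Set String × PySem.Set String
  | 0, _, seen, fields => (seen, fields)
  | n + 1, cls, seen, fields =>
    if PySem.Set.contains seen cls then (seen, fields)
    else
      (PySem.Dict.getD ⟨classmap⟩ cls []).foldl
        (fun st e =>
          e.2.foldl (fun st2 b => pvWalkA classmap n b st2.1 st2.2)
            (st.1, PySem.Set.update st.2 e.1))
        (PySem.Set.add seen cls, fields)

def resolve_dataclass_fields_py (root_class : String) (classmap : List (String × List (List String × List String))) : List String :=
  (pvWalkA classmap (classmap.length + 1) root_class PySem.Set.empty PySem.Set.empty).2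

-- ===== PORT B =====
-- A work item: visit a class, or add a definition's own fields.
inductive PvTask where
  | visit : String → PvTask
  | flds : List String → PvTask
deriving DecidableEq, Repr

-- number of classmap entries whose key is not yet seen (termination measure only)
def pvCountUnseen (classmap : List (String × List (List String × List String))) (seen : PySem.Set String) : Nat :=
  classmap.countP (fun kv => !(PySem.Set.contains seen kv.1))

lemma pvContains_false {s : PySem.Set String} {x : String} :
    PySem.Set.contains s x = false ↔ x ∉ s := by
  rw [Bool.eq_false_iff]
  exact not_congr (PySem.Set.contains_iff s x)

lemma pvCount_le (cm : List (String × List (List String × List String))) {s t : PySem.Set String}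
    (h : ∀ x ∈ s, x ∈ t) : pvCountUnseen cm t ≤ pvCountUnseen cm s := by
  refine List.countP_mono_left fun kv _ hp => ?_
  simp only [Bool.not_eq_true'] at hp ⊢
  rw [pvContains_false] at hp ⊢
  exact fun hm => hp (h _ hm)

lemma pvCount_add_le (cm : List (String × List (List String × List String))) (s : PySem.Set String) (c : String) :
    pvCountUnseen cm (PySem.Set.add s c) ≤ pvCountUnseen cm s :=
  pvCount_le cm fun x hx => (PySem.Set.mem_add s c x).mpr (Or.inl hx)

lemma pvCount_add_lt (cm : List (String × List (List String × List String))) {s : PySem.Set String} {c : String}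
    (hk : c ∈ cm.map Prod.fst) (hc : c ∉ s) :
    pvCountUnseen cm (PySem.Set.add s c) < pvCountUnseen cm s := by
  induction cm with
  | nil => simp at hk
  | cons kv tl ih =>
    simp only [List.map_cons, List.mem_cons] at hk
    unfold pvCountUnseen at *
    rcases hk with hk | hk
    · subst hk
      have h1 : PySem.Set.contains s kv.1 = false := pvContains_false.mpr hc
      have h2 : PySem.Set.contains (PySem.Set.add s kv.1) kv.1 = true :=
        (PySem.Set.contains_iff _ kv.1).mpr ((PySem.Set.mem_add s kv.1 kv.1).mpr (Or.inr rfl))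
      have hle := pvCount_add_le tl s kv.1
      unfold pvCountUnseen at hle
      rw [List.countP_cons, List.countP_cons, h1, h2]
      simpa using Nat.lt_succ_of_le hle
    · have hlt := ih hk
      have hle : (if (!(PySem.Set.contains (PySem.Set.add s c) kv.1)) = true then 1 else 0) ≤
          (if (!(PySem.Set.contains s kv.1)) = true then 1 else 0) := by
        rcases Bool.eq_false_or_eq_true (PySem.Set.contains s kv.1) with h | h
        · have h2 : PySem.Set.contains (PySem.Set.add s c) kv.1 = true :=
            (PySem.Set.contains_iff _ kv.1).mpr ((PySem.Set.mem_add s c kv.1).mpr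
              (Or.inl ((PySem.Set.contains_iff s kv.1).mp h)))
          rw [h, h2]
        · have hb : (if (!(PySem.Set.contains (PySem.Set.add s c) kv.1)) = true then (1:Nat) else 0) ≤ 1 := by
            split_ifs <;> omega
          rw [h]
          simpa using hb
      simp only [List.countP_cons]
      omega

lemma pvCount_add_eq_of_not_key (cm : List (String × List (List String × List String))) {s : PySem.Set String} {c : String}
    (hk : c ∉ cm.map Prod.fst) :
    pvCountUnseen cm (PySem.Set.add s c) = pvCountUnseen cm s := by
  unfold pvCountUnseen
  refine List.countP_congr fun kv hkv => ?_
  have hne : kv.1 ≠ c := fun h => hk (h ▸ List.mem_map_of_mem hkv)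
  have heq : PySem.Set.contains (PySem.Set.add s c) kv.1 = PySem.Set.contains s kv.1 := by
    by_cases hm : kv.1 ∈ s
    · rw [(PySem.Set.contains_iff s kv.1).mpr hm,
        (PySem.Set.contains_iff _ kv.1).mpr ((PySem.Set.mem_add s c kv.1).mpr (Or.inl hm))]
    · rw [pvContains_false.mpr hm, pvContains_false.mpr
        (fun h => ((PySem.Set.mem_add s c kv.1).mp h).elim hm hne)]
  rw [heq]

-- Iterative DFS.  The Python stack's top is its list END; here the stack's top is the
-- list HEAD, so Python's `stack.extend(reversed(tasks))` is `tasks ++ stack`.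
def pvLoopB (classmap : List (String × List (List String × List String))) :
    List PvTask → PySem.Set String → PySem.Set String → PySem.Set String
  | [], _, fields => fields
  | PvTask.flds fs :: stack, seen, fields =>
    pvLoopB classmap stack seen (PySem.Set.update fields fs)
  | PvTask.visit c :: stack, seen, fields =>
    if PySem.Set.contains seen c then pvLoopB classmap stack seen fields
    else
      let tasks := (PySem.Dict.getD ⟨classmap⟩ c []).foldl
        (fun ts e => (e.2.foldl (fun ts2 b => ts2 ++ [PvTask.visit b]) (ts ++ [PvTask.flds e.1]))) []
      pvLoopB classmap (tasks ++ stack) (PySem.Set.add seen c) fields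
termination_by stack seen _ => (pvCountUnseen classmap seen, stack.length)
decreasing_by
  · exact Prod.Lex.right _ (by simp)
  · exact Prod.Lex.right _ (by simp)
  · rename_i hc
    by_cases hk : c ∈ classmap.map Prod.fst
    · exact Prod.Lex.left _ _ (pvCount_add_lt classmap hk
        (fun hm => hc ((PySem.Set.contains_iff seen c).mpr hm)))
    · have hdc : (PySem.Dict.mk classmap).contains c = false := by
        rcases Bool.eq_false_or_eq_true ((PySem.Dict.mk classmap).contains c) with h | h
        · have hmem := (PySem.Dict.contains_iff_mem_keys _ c).mp h
          rw [PySem.Dict.keys_mk] at hmem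
          exact absurd hmem hk
        · exact h
      have hnil : (PySem.Dict.getD ⟨classmap⟩ c ([] : List (List String × List String))) = [] :=
        PySem.Dict.getD_of_not_contains _ _ hdc
      rw [pvCount_add_eq_of_not_key classmap hk]
      apply Prod.Lex.right
      simp [hnil]

def resolve_dataclass_fields_py_alt (root_class : String) (classmap : List (String × List (List String × List String))) : List String :=
  pvLoopB classmap [PvTask.visit root_class] PySem.Set.empty PySem.Set.empty

-- ===== PRECONDITION & SPEC =====
def Spec_resolve_dataclass_fields_py (root_class : String) (classmap : List (String × List (List String × List String))) (out : List String) : Prop := out = resolve_dataclass_fields_py_alt root_class classmap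
instance (root_class : String) (classmap : List (String × List (List String × List String))) (out : List String) : Decidable (Spec_resolve_dataclass_fields_py root_class classmap out) := by unfold Spec_resolve_dataclass_fields_py; infer_instance

-- ===== CLAIM (what is proved, stated in full; the proofs are below) =====
def Claim_equal_resolve_dataclass_fields_py : Prop := ∀ (root_class : String) (classmap : List (String × List (List String × List String))), Dom_resolve_dataclass_fields_py root_class classmap → Spec_resolve_dataclass_fields_py root_class classmap (resolve_dataclass_fields_py root_class classmap)

-- ===== LEMMAS AND PROOFS =====

-- the seen-set only grows through pvWalkA (and through its inner folds)
lemma pvMono_bases (cm : List (String × List (List String × List String))) (m : Nat)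
    (h : ∀ c s f, ∀ x ∈ s, x ∈ (pvWalkA cm m c s f).1) :
    ∀ (bases : List String) (st : PySem.Set String × PySem.Set String), ∀ x ∈ st.1,
      x ∈ (bases.foldl (fun st2 b => pvWalkA cm m b st2.1 st2.2) st).1 := by
  intro bases
  induction bases with
  | nil => intro st x hx; simpa using hx
  | cons b tl ih =>
    intro st x hx
    simpa using ih (pvWalkA cm m b st.1 st.2) x (h b st.1 st.2 x hx)

lemma pvMono_entries (cm : List (String × List (List String × List String))) (m : Nat)
    (h : ∀ c s f, ∀ x ∈ s, x ∈ (pvWalkA cm m c s f).1) :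
    ∀ (entries : List (List String × List String)) (st : PySem.Set String × PySem.Set String), ∀ x ∈ st.1,
      x ∈ (entries.foldl (fun st e =>
        e.2.foldl (fun st2 b => pvWalkA cm m b st2.1 st2.2) (st.1, PySem.Set.update st.2 e.1)) st).1 := by
  intro entries
  induction entries with
  | nil => intro st x hx; simpa using hx
  | cons e tl ih =>
    intro st x hx
    exact ih _ x (pvMono_bases cm m h e.2 (st.1, PySem.Set.update st.2 e.1) x hx)

lemma pvMono_walk (cm : List (String × List (List String × List String))) :
    ∀ (n : Nat) (c : String) (s f : PySem.Set String), ∀ x ∈ s, x ∈ (pvWalkA cm n c s f).1 := by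
  intro n
  induction n with
  | zero => intro c s f x hx; simpa [pvWalkA] using hx
  | succ m ih =>
    intro c s f x hx
    rw [pvWalkA]
    by_cases hc : PySem.Set.contains s c = true
    · rw [if_pos hc]; exact hx
    · rw [if_neg hc]
      exact pvMono_entries cm m ih _ _ x ((PySem.Set.mem_add s c x).mpr (Or.inl hx))

-- unfolding equations for the worklist loop
lemma pvLoopB_nil (cm : List (String × List (List String × List String))) (s f : PySem.Set String) :
    pvLoopB cm [] s f = f := by
  rw [pvLoopB]

lemma pvLoopB_flds (cm : List (String × List (List String × List String))) (fs : List String)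
    (st : List PvTask) (s f : PySem.Set String) :
    pvLoopB cm (PvTask.flds fs :: st) s f = pvLoopB cm st s (PySem.Set.update f fs) := by
  rw [pvLoopB]

lemma pvLoopB_visit_seen (cm : List (String × List (List String × List String))) (c : String)
    (st : List PvTask) (s f : PySem.Set String) (hc : PySem.Set.contains s c = true) :
    pvLoopB cm (PvTask.visit c :: st) s f = pvLoopB cm st s f := by
  rw [pvLoopB, if_pos hc]

lemma pvLoopB_visit_new (cm : List (String × List (List String × List String))) (c : String)
    (st : List PvTask) (s f : PySem.Set String) (hc : PySem.Set.contains s c = false) :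
    pvLoopB cm (PvTask.visit c :: st) s f =
      pvLoopB cm (((PySem.Dict.getD ⟨cm⟩ c []).foldl
          (fun ts e => (e.2.foldl (fun ts2 b => ts2 ++ [PvTask.visit b]) (ts ++ [PvTask.flds e.1]))) []) ++ st)
        (PySem.Set.add s c) f := by
  rw [pvLoopB, if_neg (by rw [hc]; simp)]

-- the task list pushed for a class, as a flatMap
lemma pvTasks_eq (entries : List (List String × List String)) :
    entries.foldl (fun ts e => (e.2.foldl (fun ts2 b => ts2 ++ [PvTask.visit b]) (ts ++ [PvTask.flds e.1]))) [] =
      entries.flatMap (fun e => PvTask.flds e.1 :: e.2.map PvTask.visit) := by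
  have h : ∀ (l : List (List String × List String)) (acc : List PvTask),
      l.foldl (fun ts e => (e.2.foldl (fun ts2 b => ts2 ++ [PvTask.visit b]) (ts ++ [PvTask.flds e.1]))) acc =
        acc ++ l.flatMap (fun e => PvTask.flds e.1 :: e.2.map PvTask.visit) := by
    intro l
    induction l with
    | nil => intro acc; simp
    | cons e tl ih =>
      intro acc
      rw [List.foldl_cons, PySem.List.foldl_append_singleton_eq_map, ih]
      simp [List.append_assoc]
  simpa using h entries []

-- main simulation: popping `visit c` runs A's walk on c
lemma pvMain (cm : List (String × List (List String × List String))) :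
    ∀ (n : Nat) (c : String) (s f : PySem.Set String) (stack : List PvTask),
      pvCountUnseen cm s < n →
      pvLoopB cm (PvTask.visit c :: stack) s f =
        pvLoopB cm stack (pvWalkA cm n c s f).1 (pvWalkA cm n c s f).2 := by
  intro n
  induction n with
  | zero => intro c s f stack h; omega
  | succ m ih =>
    have hB : ∀ (bases : List String) (st : PySem.Set String × PySem.Set String) (rest : List PvTask),
        pvCountUnseen cm st.1 < m →
        pvLoopB cm (bases.map PvTask.visit ++ rest) st.1 st.2 =
          pvLoopB cm rest (bases.foldl (fun st2 b => pvWalkA cm m b st2.1 st2.2) st).1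
            (bases.foldl (fun st2 b => pvWalkA cm m b st2.1 st2.2) st).2 := by
      intro bases
      induction bases with
      | nil => intro st rest h; simp
      | cons b tl ihb =>
        intro st rest h
        simp only [List.map_cons, List.cons_append, List.foldl_cons]
        rw [ih b st.1 st.2 (tl.map PvTask.visit ++ rest) h]
        exact ihb (pvWalkA cm m b st.1 st.2) rest
          (lt_of_le_of_lt (pvCount_le cm (fun x hx => pvMono_walk cm m b st.1 st.2 x hx)) h)
    have hE : ∀ (entries : List (List String × List String)) (st : PySem.Set String × PySem.Set String)
        (rest : List PvTask),
        pvCountUnseen cm st.1 < m →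
        pvLoopB cm (entries.flatMap (fun e => PvTask.flds e.1 :: e.2.map PvTask.visit) ++ rest) st.1 st.2 =
          pvLoopB cm rest
            (entries.foldl (fun st e =>
              e.2.foldl (fun st2 b => pvWalkA cm m b st2.1 st2.2) (st.1, PySem.Set.update st.2 e.1)) st).1
            (entries.foldl (fun st e =>
              e.2.foldl (fun st2 b => pvWalkA cm m b st2.1 st2.2) (st.1, PySem.Set.update st.2 e.1)) st).2 := by
      intro entries
      induction entries with
      | nil => intro st rest h; simp
      | cons e tl ihe =>
        intro st rest h
        simp only [List.flatMap_cons, List.cons_append, List.append_assoc, List.foldl_cons]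
        rw [pvLoopB_flds]
        rw [hB e.2 (st.1, PySem.Set.update st.2 e.1) (tl.flatMap (fun e => PvTask.flds e.1 :: e.2.map PvTask.visit) ++ rest) h]
        exact ihe _ rest
          (lt_of_le_of_lt (pvCount_le cm (fun x hx =>
            pvMono_bases cm m (pvMono_walk cm m) e.2 (st.1, PySem.Set.update st.2 e.1) x hx)) h)
    intro c s f stack h
    rw [pvWalkA]
    rcases Bool.eq_false_or_eq_true (PySem.Set.contains s c) with hc | hc
    · rw [if_pos hc, pvLoopB_visit_seen cm c stack s f hc]
    · rw [if_neg (by rw [hc]; simp), pvLoopB_visit_new cm c stack s f hc, pvTasks_eq]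
      by_cases hEnil : (PySem.Dict.getD (⟨cm⟩ : PySem.Dict String (List (List String × List String))) c []) = []
      · rw [hEnil]
        simp
      · have hkey : c ∈ cm.map Prod.fst := by
          by_contra hk
          have hdc : (PySem.Dict.mk cm).contains c = false := by
            rw [Bool.eq_false_iff]
            intro hcon
            have hmem := (PySem.Dict.contains_iff_mem_keys _ c).mp hcon
            rw [PySem.Dict.keys_mk] at hmem
            exact hk hmem
          exact hEnil (PySem.Dict.getD_of_not_contains _ _ hdc)
        have hlt : pvCountUnseen cm (PySem.Set.add s c) < pvCountUnseen cm s :=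
          pvCount_add_lt cm hkey (pvContains_false.mp hc)
        exact hE _ (PySem.Set.add s c, f) stack
          (show pvCountUnseen cm (PySem.Set.add s c) < m by omega)

-- ===== VERDICT (by name: the statement is the Claim_ definition above) =====
theorem resolve_dataclass_fields_py_spec : Claim_equal_resolve_dataclass_fields_py := by
  intro root cm _
  unfold Spec_resolve_dataclass_fields_py resolve_dataclass_fields_py resolve_dataclass_fields_py_alt
  have h : pvCountUnseen cm PySem.Set.empty < cm.length + 1 :=
    Nat.lt_succ_of_le List.countP_le_length
  rw [pvMain cm (cm.length + 1) root PySem.Set.empty PySem.Set.empty [] h, pvLoopB_nil]
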